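-- pv_equiv track=rewrite | github.com/LULLULALLA0525/Everyday_CodingTest | 바이러스.py | solution
-- ===== SOURCE A (Python) =====
-- from collections import deque
--
-- def solution(n, graph):
--     answer = 0
--     visited = [False] * (n + 1)
--     queue = deque()
--     queue.append(1)
--     while queue:
--         cur = queue.popleft()
--         if visited[cur]:
--             continue
--         else:
--             visited[cur] = True
--             answer += 1
--             for node in graph[cur]:
--                 queue.append(node)
--     return answer - 1
-- ===== SOURCE B (Python) =====
-- def solution(n, graph):
--     visited = {1}
--     while True:
--         frontier = {u for v in visited for u in graph[v]} - visited
--         if not frontier: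
--             return len(visited) - 1
--         visited |= frontier
-- ===== Notes on version B (the rewrite author's own statement) =====
-- stated objective: alternative
-- what changed: Replaces the worklist BFS (deque of individual nodes, mark-on-pop into a boolean array, explicit counter) by round-based fixpoint iteration: repeatedly take the whole set of neighbours of all visited nodes, subtract the visited set, and stop when that frontier is empty, returning the set's size minus one; no queue or per-node worklist exists at all.
-- outside the precondition, e.g. on solution(1, [[], [-1]]): A returns 0, B returns 1
import Mathlib
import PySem

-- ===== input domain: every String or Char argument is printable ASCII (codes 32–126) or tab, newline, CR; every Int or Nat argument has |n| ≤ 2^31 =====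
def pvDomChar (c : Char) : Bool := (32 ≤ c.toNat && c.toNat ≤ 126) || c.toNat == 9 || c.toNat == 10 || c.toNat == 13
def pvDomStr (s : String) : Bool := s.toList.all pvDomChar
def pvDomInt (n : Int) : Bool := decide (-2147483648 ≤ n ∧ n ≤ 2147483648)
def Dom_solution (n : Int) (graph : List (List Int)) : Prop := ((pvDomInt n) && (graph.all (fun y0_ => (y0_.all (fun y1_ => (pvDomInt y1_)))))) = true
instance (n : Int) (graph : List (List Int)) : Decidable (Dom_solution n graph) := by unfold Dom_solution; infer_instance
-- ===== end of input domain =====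

-- B replaces A's node-at-a-time deque-BFS (mark-on-pop, boolean array, counter) by a
-- round-based fixpoint iteration with no worklist: repeatedly add all neighbours of the
-- whole visited set until the frontier is empty, then return the set size minus one
-- (objective: alternative; same value on every well-formed adjacency list).

-- ===== PORT A =====
-- termination helper for the BFS loop: marking a node that tests False lowers the False count
theorem pv_count_set_false (xs : List Bool) : ∀ k : Nat, k < xs.length → xs.getD k false = false →
    (xs.set k true).count false + 1 = xs.count false ∧ (xs.set k true).count true = xs.count true + 1 := by
  induction xs with
  | nil => intro k hk; simp at hk
  | cons b t ih =>
    intro k hk hd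
    cases k with
    | zero => simp_all
    | succ k =>
      have := ih k (by simpa using hk) (by simpa using hd)
      cases b <;> simp_all

theorem pv_countFalse_set (xs : List Bool) (i : Int) (h : PySem.List.pyGet? xs i = some false) :
    (PySem.List.pySetD xs i true).count false < xs.count false := by
  simp only [PySem.List.pyGet?, PySem.List.pyIdx?] at h
  split_ifs at h with h0 h1 h2
  · -- nonnegative in-range index
    have hk : i.toNat < xs.length := by omega
    have hget : xs.getD i.toNat false = false := by
      rw [List.getD_eq_getElem?_getD]; simp_all
    have := pv_count_set_false xs i.toNat hk hget
    rw [PySem.List.pySetD_of_nonneg _ true h0]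
    omega
  · simp at h
  · -- negative index, wraps
    set k := xs.length - (-i).toNat with hkdef
    have hkmem : (xs[k]?).getD false = false := by
      simp only [Option.bind] at h; cases hx : xs[k]? <;> simp_all
    have hklt : k < xs.length := by omega
    have hget : xs.getD k false = false := by rw [List.getD_eq_getElem?_getD]; exact hkmem
    have hcnt := pv_count_set_false xs k hklt hget
    have hset : PySem.List.pySetD xs i true = xs.set k true := by
      simp only [PySem.List.pySetD, PySem.List.pySet?, PySem.List.pyIdx?]
      split_ifs <;> simp_all
    rw [hset]; omega
  · simp at h

-- A's port: the deque-BFS loop (state: visited booleans, queue, counter), marking on pop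
def solutionLoop (graph : List (List Int)) (visited : List Bool) (queue : List Int) (answer : Int) : Int :=
  match queue with
  | [] => answer
  | cur :: rest =>
    if (PySem.List.pyGet? visited cur).getD true then
      solutionLoop graph visited rest answer
    else
      solutionLoop graph (PySem.List.pySetD visited cur true)
        (rest ++ PySem.List.pyGetD graph cur []) (answer + 1)
termination_by (visited.count false, queue.length)
decreasing_by
  · exact Prod.Lex.right _ (by simp)
  · apply Prod.Lex.left
    apply pv_countFalse_set
    rename_i hc
    cases hx : PySem.List.pyGet? visited cur with
    | none => rw [hx] at hc; simp at hc
    | some b => cases b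
                · rfl
                · rw [hx] at hc; simp at hc

def solution (n : Int) (graph : List (List Int)) : Int :=
  solutionLoop graph (List.replicate (n + 1).toNat false) [1] 0 - 1

-- ===== PORT B =====
-- the frontier of one round: {u for v in visited for u in graph[v]} - visited
def pvFrontier (graph : List (List Int)) (visited : PySem.Set Int) : PySem.Set Int :=
  PySem.Set.diff (PySem.Set.ofList (visited.flatMap (fun v => PySem.List.pyGetD graph v []))) visited

-- termination helpers for the fixpoint loop
theorem pv_countP_lt (p q : Int → Bool) : ∀ l : List Int, (∀ x ∈ l, q x = true → p x = true) →
    ∀ u ∈ l, p u = true → q u = false → l.countP q < l.countP p := by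
  intro l
  induction l with
  | nil => simp
  | cons x t ih =>
    intro hmono u hu hp hq
    have hxcontrib : q x = true → p x = true := hmono x (by simp)
    rcases List.mem_cons.mp hu with rfl | hut
    · have : t.countP q ≤ t.countP p := List.countP_mono_left (fun x hx => hmono x (List.mem_cons_of_mem _ hx))
      simp only [List.countP_cons, hp, hq]
      simp; omega
    · have := ih (fun x hx => hmono x (List.mem_cons_of_mem _ hx)) u hut hp hq
      simp only [List.countP_cons]
      cases hqx : q x <;> cases hpx : p x <;> simp_all <;> omega

def bMeasure (graph : List (List Int)) (visited : PySem.Set Int) : Nat :=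
  (graph.flatMap id).countP (fun x => !(PySem.Set.contains visited x))

theorem pv_pyGetD_mem_or_nil (graph : List (List Int)) (v : Int) :
    PySem.List.pyGetD graph v [] = [] ∨ PySem.List.pyGetD graph v [] ∈ graph := by
  simp only [PySem.List.pyGetD]
  cases hx : PySem.List.pyGet? graph v with
  | none => left; rfl
  | some row =>
    right
    simp only [PySem.List.pyGet?] at hx
    cases hy : PySem.List.pyIdx? graph.length v with
    | none => rw [hy] at hx; simp at hx
    | some k => rw [hy] at hx; simp at hx
                exact List.mem_of_getElem? hx

theorem pv_bMeasure_lt (graph : List (List Int)) (vs vs' : PySem.Set Int)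
    (hmono : ∀ x, x ∈ vs → x ∈ vs') (u : Int) (hu : u ∈ graph.flatMap id)
    (hnot : u ∉ vs) (hin : u ∈ vs') :
    bMeasure graph vs' < bMeasure graph vs := by
  apply pv_countP_lt
  · intro x hx hq
    have hq' : x ∉ vs' := by
      simp only [PySem.Set.contains, Bool.not_eq_true', List.contains_eq_mem,
        decide_eq_false_iff_not] at hq
      exact hq
    have : x ∉ vs := fun hmem => hq' (hmono x hmem)
    simp only [PySem.Set.contains, Bool.not_eq_true', List.contains_eq_mem,
      decide_eq_false_iff_not]
    exact this
  · exact hu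
  · simp only [PySem.Set.contains, List.contains_eq_mem]
    simpa using hnot
  · simpa [PySem.Set.contains, List.contains_eq_mem] using hin

theorem pv_frontier_sub (graph : List (List Int)) (visited : PySem.Set Int) (u : Int)
    (hu : u ∈ pvFrontier graph visited) :
    (∃ v ∈ visited, u ∈ PySem.List.pyGetD graph v []) ∧ u ∉ visited := by
  unfold pvFrontier at hu
  rw [PySem.Set.mem_diff, PySem.Set.mem_ofList, List.mem_flatMap] at hu
  exact hu

-- B's port: round-based fixpoint iteration (no queue/stack), stop when the frontier is empty
def solutionAltLoop (graph : List (List Int)) (visited : PySem.Set Int) : PySem.Set Int :=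
  let frontier := pvFrontier graph visited
  if frontier = [] then visited
  else solutionAltLoop graph (PySem.Set.union visited frontier)
termination_by bMeasure graph visited
decreasing_by
  rename_i hne
  rcases List.exists_mem_of_ne_nil _ hne with ⟨u, hu⟩
  obtain ⟨⟨v, hv, huv⟩, hnot⟩ := pv_frontier_sub graph visited u hu
  apply pv_bMeasure_lt graph visited _ (fun x hx => (PySem.Set.mem_union _ _ _).mpr (Or.inl hx)) u
  · rcases pv_pyGetD_mem_or_nil graph v with hnil | hmem
    · rw [hnil] at huv; simp at huv
    · exact List.mem_flatMap.mpr ⟨_, hmem, huv⟩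
  · exact hnot
  · exact (PySem.Set.mem_union _ _ _).mpr (Or.inr hu)

def solution_alt (n : Int) (graph : List (List Int)) : Int :=
  PySem.Set.len (solutionAltLoop graph (PySem.Set.ofList [1])) - 1

-- ===== PRECONDITION & SPEC =====
-- the nodes the search can see: 1 and everything listed from it, iterated to closure
def pvExpand (graph : List (List Int)) (S : List Int) : List Int :=
  PySem.List.dedup (S ++ S.flatMap (fun v => PySem.List.pyGetD graph v []))

def pvClosure (graph : List (List Int)) : List Int :=
  (pvExpand graph)^[graph.length + 2] [1]

-- Pre_ asks that node 1 exists and that every node the search can reach from it is a valid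
-- node of the adjacency list (0 ≤ v ≤ n, row v present, neighbours inside the same closed
-- set). Excluded inputs are ones where A raises IndexError or where A's value depends on
-- Python's negative-index / out-of-range wraparound into the visited array, a corner no
-- caller of an adjacency-list BFS specifies.
def Pre_solution (n : Int) (graph : List (List Int)) : Prop :=
  1 ≤ n ∧ 2 ≤ (graph.length : Int) ∧
    ∀ v ∈ pvClosure graph, (0 ≤ v ∧ v ≤ n ∧ v + 1 ≤ (graph.length : Int)) ∧
      ∀ u ∈ PySem.List.pyGetD graph v [], u ∈ pvClosure graph
instance (n : Int) (graph : List (List Int)) : Decidable (Pre_solution n graph) := by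
  unfold Pre_solution; infer_instance

def pvWitness_solution : Int × List (List Int) := (2, [[1], [2], [1]])

def Spec_solution (n : Int) (graph : List (List Int)) (out : Int) : Prop := out = solution_alt n graph
instance (n : Int) (graph : List (List Int)) (out : Int) : Decidable (Spec_solution n graph out) := by unfold Spec_solution; infer_instance

-- ===== CLAIM (what is proved, stated in full; the proofs are below) =====
def Claim_equal_solution : Prop := ∀ (n : Int) (graph : List (List Int)), Dom_solution n graph → Pre_solution n graph → Spec_solution n graph (solution n graph)

-- ===== LEMMAS AND PROOFS =====

-- reachability from node 1 along the adjacency list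
def pvReach (graph : List (List Int)) : Int → Prop :=
  Relation.ReflTransGen (fun a b => b ∈ PySem.List.pyGetD graph a []) 1

-- "index i is marked True" in A's boolean array
def pvMk (vis : List Bool) (i : Int) : Prop := 0 ≤ i ∧ vis.getD i.toNat false = true

theorem pv_mem_iterate_expand (graph : List (List Int)) (x : Int) :
    ∀ (k : Nat) (S : List Int), x ∈ S → x ∈ (pvExpand graph)^[k] S := by
  intro k
  induction k with
  | zero => intro S hx; simpa using hx
  | succ k ih =>
    intro S hx
    rw [Function.iterate_succ_apply]
    exact ih _ (by simp [pvExpand, PySem.List.mem_dedup, hx])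

theorem pv_reach_in_closure (graph : List (List Int))
    (hcl : ∀ v ∈ pvClosure graph, ∀ u ∈ PySem.List.pyGetD graph v [], u ∈ pvClosure graph) :
    ∀ v, pvReach graph v → v ∈ pvClosure graph := by
  intro v h
  induction h with
  | refl => exact pv_mem_iterate_expand graph 1 _ [1] (by simp)
  | tail h1 h2 ih => exact hcl _ ih _ h2

theorem pv_pyGet?_eq (xs : List Bool) (i : Int) (h0 : 0 ≤ i) (h1 : i.toNat < xs.length) :
    PySem.List.pyGet? xs i = some (xs.getD i.toNat false) := by
  simp only [PySem.List.pyGet?, PySem.List.pyIdx?]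
  rw [if_pos h0, if_pos (by omega : i < (xs.length : Int))]
  simp [List.getD_eq_getElem?_getD, List.getElem?_eq_getElem h1]

theorem pv_getD_set (xs : List Bool) (k j : Nat) (hk : k < xs.length) :
    (xs.set k true).getD j false = if j = k then true else xs.getD j false := by
  simp only [List.getD_eq_getElem?_getD, List.getElem?_set]
  by_cases hjk : j = k
  · subst hjk
    rw [if_pos rfl, if_pos rfl, if_pos hk]
    rfl
  · rw [if_neg (fun h => hjk h.symm), if_neg hjk]

theorem pv_mk_set (xs : List Bool) (c : Int) (hc0 : 0 ≤ c) (hlt : c.toNat < xs.length) (i : Int) :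
    pvMk (xs.set c.toNat true) i ↔ i = c ∨ pvMk xs i := by
  unfold pvMk
  constructor
  · rintro ⟨h0, hget⟩
    rw [pv_getD_set _ _ _ hlt] at hget
    split_ifs at hget with he
    · left; omega
    · exact Or.inr ⟨h0, hget⟩
  · rintro (rfl | ⟨h0, hget⟩)
    · exact ⟨hc0, by rw [pv_getD_set _ _ _ hlt]; simp⟩
    · refine ⟨h0, ?_⟩
      rw [pv_getD_set _ _ _ hlt]
      split_ifs with he
      · rfl
      · exact hget

theorem pv_aLoop_spec (n : Int) (graph : List (List Int))
    (hbnd : ∀ v, pvReach graph v → 0 ≤ v ∧ v ≤ n ∧ v + 1 ≤ (graph.length : Int)) :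
    ∀ (visited : List Bool) (queue : List Int) (answer : Int),
    visited.length = (n + 1).toNat →
    (∀ x ∈ queue, pvReach graph x) →
    (∀ i, pvMk visited i → pvReach graph i) →
    (∀ i, pvMk visited i → ∀ u ∈ PySem.List.pyGetD graph i [], pvMk visited u ∨ u ∈ queue) →
    (pvMk visited 1 ∨ 1 ∈ queue) →
    answer = (visited.count true : Int) →
    ∃ vis', solutionLoop graph visited queue answer = (vis'.count true : Int) ∧
      (∀ i, pvMk vis' i ↔ pvReach graph i) := by
  intro visited queue answer
  fun_induction solutionLoop graph visited queue answer with
  | case1 vis ans =>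
    intro _ _ hm hcl hst hans
    refine ⟨vis, hans, fun i => ⟨hm i, fun hr => ?_⟩⟩
    induction hr with
    | refl =>
      rcases hst with h1 | h1
      · exact h1
      · simp at h1
    | tail h1 h2 ihr =>
      rename_i b c
      rcases hcl b ihr c h2 with h3 | h3
      · exact h3
      · simp at h3
  | case2 vis ans cur rest htest ih =>
    intro hlen hq hm hcl hst hans
    have hcurR : pvReach graph cur := hq cur (by simp)
    have hb := hbnd cur hcurR
    have hlt : cur.toNat < vis.length := by omega
    have hget := pv_pyGet?_eq vis cur hb.1 hlt
    have hMkcur : pvMk vis cur := by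
      refine ⟨hb.1, ?_⟩
      rw [hget] at htest; simpa using htest
    apply ih hlen (fun x hx => hq x (List.mem_cons_of_mem _ hx)) hm ?_ ?_ hans
    · intro i hi u hu
      rcases hcl i hi u hu with h | h
      · exact Or.inl h
      · rcases List.mem_cons.mp h with rfl | h
        · exact Or.inl hMkcur
        · exact Or.inr h
    · rcases hst with h | h
      · exact Or.inl h
      · rcases List.mem_cons.mp h with rfl | h
        · exact Or.inl hMkcur
        · exact Or.inr h
  | case3 vis ans cur rest htest ih =>
    intro hlen hq hm hcl hst hans
    have hcurR : pvReach graph cur := hq cur (by simp)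
    have hb := hbnd cur hcurR
    have hlt : cur.toNat < vis.length := by omega
    have hget := pv_pyGet?_eq vis cur hb.1 hlt
    have hfalse : vis.getD cur.toNat false = false := by
      rw [hget] at htest; simpa using htest
    have hset : PySem.List.pySetD vis cur true = vis.set cur.toNat true :=
      PySem.List.pySetD_of_nonneg _ true hb.1
    have hmk' : ∀ i, pvMk (PySem.List.pySetD vis cur true) i ↔ i = cur ∨ pvMk vis i := by
      intro i; rw [hset]; exact pv_mk_set vis cur hb.1 hlt i
    have hcount := pv_count_set_false vis cur.toNat hlt hfalse
    apply ih ?_ ?_ ?_ ?_ ?_ ?_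
    · rw [hset]; simpa [List.length_set] using hlen
    · intro x hx
      rcases List.mem_append.mp hx with hx | hx
      · exact hq x (List.mem_cons_of_mem _ hx)
      · exact Relation.ReflTransGen.tail hcurR hx
    · intro i hi
      rcases (hmk' i).mp hi with rfl | h
      · exact hcurR
      · exact hm i h
    · intro i hi u hu
      rcases (hmk' i).mp hi with rfl | h
      · exact Or.inr (List.mem_append.mpr (Or.inr hu))
      · rcases hcl i h u hu with h2 | h2
        · exact Or.inl ((hmk' u).mpr (Or.inr h2))
        · rcases List.mem_cons.mp h2 with rfl | h2
          · exact Or.inl ((hmk' u).mpr (Or.inl rfl))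
          · exact Or.inr (List.mem_append.mpr (Or.inl h2))
    · rcases hst with h | h
      · exact Or.inl ((hmk' 1).mpr (Or.inr h))
      · rcases List.mem_cons.mp h with he | h
        · exact Or.inl ((hmk' 1).mpr (Or.inl he))
        · exact Or.inr (List.mem_append.mpr (Or.inl h))
    · rw [hset]
      have : (vis.set cur.toNat true).count true = vis.count true + 1 := hcount.2
      rw [this]
      push_cast
      omega

theorem pv_bLoop_spec (graph : List (List Int)) :
    ∀ (visited : PySem.Set Int),
    (∀ x ∈ visited, pvReach graph x) →
    visited.Nodup →
    (1 : Int) ∈ visited →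
    (solutionAltLoop graph visited).Nodup ∧
      (∀ x, x ∈ solutionAltLoop graph visited ↔ pvReach graph x) := by
  intro visited
  fun_induction solutionAltLoop graph visited with
  | case1 visited frontier hemp =>
    intro hreach hnd hone
    refine ⟨hnd, fun x => ⟨hreach x, fun hr => ?_⟩⟩
    induction hr with
    | refl => exact hone
    | tail h1 h2 ihr =>
      rename_i b c
      by_contra hc
      have : c ∈ pvFrontier graph visited := by
        unfold pvFrontier
        rw [PySem.Set.mem_diff, PySem.Set.mem_ofList, List.mem_flatMap]
        exact ⟨⟨b, ihr, h2⟩, hc⟩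
      rw [show pvFrontier graph visited = [] from hemp] at this
      simp at this
  | case2 visited frontier hemp ih =>
    intro hreach hnd hone
    apply ih
    · intro x hx
      rcases (PySem.Set.mem_union _ _ _).mp hx with hx | hx
      · exact hreach x hx
      · obtain ⟨⟨v, hv, huv⟩, _⟩ := pv_frontier_sub graph visited x hx
        exact Relation.ReflTransGen.tail (hreach v hv) huv
    · exact PySem.Set.nodup_union _ _ hnd
    · exact (PySem.Set.mem_union _ _ _).mpr (Or.inl hone)

theorem pv_count_true_eq : ∀ l : List Bool,
    l.count true = ((List.range l.length).filter (fun j => l.getD j false)).length := by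
  intro l
  induction l with
  | nil => rfl
  | cons b t ih =>
    rw [List.length_cons, List.range_succ_eq_map, List.filter_cons]
    cases b <;>
      (simp [List.filter_map, ih]
       exact congrArg List.length (List.filter_congr fun j hj => rfl))

theorem pv_mem_marked (vis : List Bool) (i : Int) :
    (i ∈ ((List.range vis.length).filter (fun j => vis.getD j false)).map (fun j : Nat => (j : Int)))
      ↔ pvMk vis i := by
  simp only [List.mem_map, List.mem_filter, List.mem_range]
  constructor
  · rintro ⟨j, ⟨hj, hget⟩, rfl⟩
    exact ⟨by omega, by simpa using hget⟩
  · rintro ⟨h0, hget⟩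
    have hlt : i.toNat < vis.length := by
      by_contra hge
      rw [List.getD_eq_default _ _ (by omega)] at hget
      simp at hget
    exact ⟨i.toNat, ⟨hlt, hget⟩, by omega⟩

-- ===== VERDICT (by name: the statement is the Claim_ definition above) =====
theorem solution_spec : Claim_equal_solution := by
  intro n graph _ hpre
  obtain ⟨hn, hL, hcl⟩ := hpre
  have hbnd : ∀ v, pvReach graph v → 0 ≤ v ∧ v ≤ n ∧ v + 1 ≤ (graph.length : Int) := by
    intro v hv
    exact (hcl v (pv_reach_in_closure graph (fun w hw => (hcl w hw).2) v hv)).1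
  unfold Spec_solution solution solution_alt
  have hrep : ∀ j, (List.replicate (n + 1).toNat false).getD j false = false := by
    intro j
    simp only [List.getD_eq_getElem?_getD, List.getElem?_replicate]
    split <;> rfl
  obtain ⟨visA, hA1, hA2⟩ := pv_aLoop_spec n graph hbnd
    (List.replicate (n + 1).toNat false) [1] 0
    (by simp)
    (by intro x hx; rw [List.mem_singleton] at hx; subst hx; exact Relation.ReflTransGen.refl)
    (by rintro i ⟨h0, hget⟩; rw [hrep] at hget; simp at hget)
    (by rintro i ⟨h0, hget⟩ u hu; rw [hrep] at hget; simp at hget)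
    (Or.inr (by simp))
    (by simp [List.count_replicate])
  have hof : PySem.Set.ofList [(1 : Int)] = [1] := rfl
  obtain ⟨hBnd, hBmem⟩ := pv_bLoop_spec graph [1]
    (by intro x hx; rw [List.mem_singleton] at hx; subst hx; exact Relation.ReflTransGen.refl)
    (by simp)
    (by simp)
  have hndA : (((List.range visA.length).filter (fun j => visA.getD j false)).map
      (fun j : Nat => (j : Int))).Nodup := by
    apply List.Nodup.map
    · exact fun a b h => by exact_mod_cast h
    · exact List.Nodup.filter _ List.nodup_range
  have hperm : (((List.range visA.length).filter (fun j => visA.getD j false)).map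
      (fun j : Nat => (j : Int))).Perm (solutionAltLoop graph [1]) :=
    (List.perm_ext_iff_of_nodup hndA hBnd).mpr
      (fun a => by rw [pv_mem_marked, hA2, ← hBmem])
  have hlen := hperm.length_eq
  rw [List.length_map] at hlen
  rw [hof, hA1]
  have hcnt : visA.count true = (solutionAltLoop graph [1]).length := by
    rw [pv_count_true_eq]; exact hlen
  simp [PySem.Set.len, hcnt]
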